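-- pv_equiv track=rewrite | github.com/lenguyen8888/UCSD_DS_Alg | 1_Algorithmic_Toolbox/week6_dynamic_programming2/2_partitioning_souvenirs/partition3.py | partition3_dp
-- ===== SOURCE A (Python) =====
-- def partition3_dp(arr):
--     """
--     Determines if it is possible to partition the given array into three subsets with equal sums.
--
--     Args:
--         arr (list): The input array of integers.
--
--     Returns:
--         tuple: A tuple containing a boolean value indicating if partitioning is possible and the
--          dynamic programming table.
--
--     The extra dynamic programming table is returned for debugging purposes.
--
--     """
--
--     total_sum = sum(arr)
--     n = len(arr)
--
--     if total_sum % 3 != 0: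
--         return False, None
--
--     dp = [[[False for _ in range(total_sum + 1)] for _ in range(total_sum + 1)] for _ in range(n + 1)]
--     dp[0][0][0] = True
--
--     # target is the sum of each subset
--     target = total_sum // 3
--
--     # i entries in the dp table represent the first i elements of the array
--     # j entries represent the sum of the first subset
--     # k entries represent the sum of the second subset
--     # dp[i][j][k] is True if it is possible to partition the first i elements of the array into
--     # three subsets with sums j, k, and total_sum - j - k respectively
--     for i in range(1, n + 1):
--         for j in range(target + 1):
--             for k in range(target + 1):
--                 # If it is possible to partition the first i - 1 elements of the array into three
--                 dp[i][j][k] = dp[i - 1][j][k]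
--
--                 # If j >= arr[i - 1], then it is possible to partition the first i elements of the
--                 if j >= arr[i - 1]:
--                     # If it is possible to partition the first i - 1 elements of the array into
--                     # three subsets with sums j - arr[i - 1], k, and total_sum - j - k respectively
--                     dp[i][j][k] = dp[i][j][k] or dp[i - 1][j - arr[i - 1]][k]
--
--                 # similarly, if k >= arr[i - 1], then it is possible to partition the first i
--                 if k >= arr[i - 1]:
--                     # If it is possible to partition the first i - 1 elements of the array into
--                     # three subsets with sums j, k - arr[i - 1], and total_sum - j - k respectively
--                     dp[i][j][k] = dp[i][j][k] or dp[i - 1][j][k - arr[i - 1]]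
--
--     return dp[n][target][target], dp
-- ===== SOURCE B (Python) =====
-- def partition3_dp(arr):
--     total = sum(arr)
--     n = len(arr)
--     if total % 3 != 0:
--         return False, None
--     target = total // 3
--     # earliest prefix length at which each (j, k) pair of subset sums becomes reachable;
--     # dp is monotone in i, so every cell is just a threshold test against this map
--     first = {(0, 0): 0}
--     for i, a in enumerate(arr, 1):
--         for j, k in list(first):
--             if 0 <= j + a <= target and (j + a, k) not in first:
--                 first[j + a, k] = i
--             if 0 <= k + a <= target and (j, k + a) not in first:
--                 first[j, k + a] = i
--     dp = [[[(j, k) in first and first[j, k] <= i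
--             for k in range(total + 1)]
--            for j in range(total + 1)]
--           for i in range(n + 1)]
--     return (target, target) in first and first[target, target] <= n, dp
-- ===== Notes on version B (the rewrite author's own statement) =====
-- stated objective: alternative
-- what changed: B never builds per-layer dp states at all: exploiting that dp[i][j][k] is monotone in i, it computes in one sparse forward pass a single map from each (j,k) pair to the EARLIEST prefix length at which it becomes reachable, and then derives every dp cell (and the answer) as a threshold test first[(j,k)] <= i.
-- outside the precondition, e.g. on partition3_dp([-3]): A raises IndexError, B returns (False, [[], []])
import Mathlib
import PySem

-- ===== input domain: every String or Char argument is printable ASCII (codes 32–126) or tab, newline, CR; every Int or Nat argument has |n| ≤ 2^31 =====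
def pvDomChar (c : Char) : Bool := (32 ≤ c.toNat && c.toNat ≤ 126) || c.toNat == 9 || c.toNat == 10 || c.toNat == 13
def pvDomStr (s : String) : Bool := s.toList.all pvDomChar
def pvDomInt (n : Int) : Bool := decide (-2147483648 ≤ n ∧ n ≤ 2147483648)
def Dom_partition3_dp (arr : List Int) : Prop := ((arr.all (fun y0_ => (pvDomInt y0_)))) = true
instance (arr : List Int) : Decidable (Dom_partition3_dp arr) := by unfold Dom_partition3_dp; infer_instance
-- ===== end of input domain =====

-- B replaces A's layer-by-layer dp-table computation by a single earliest-reachability map: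
-- using that dp[i][j][k] is monotone in i, it records for each (j,k) only the earliest prefix
-- length reaching it and derives every dp cell as a threshold test (objective: alternative).

-- ===== PORT A =====
-- dp[j][k] read/write; indices are nonnegative wherever Python A returns normally (Pre_), so
-- Nat indexing via toNat is exact there (Python raises on the out-of-range reads Pre_ excludes;
-- here getD returns the default).
def pvGet2 (L : List (List Bool)) (j k : Int) : Bool :=
  (L.getD j.toNat []).getD k.toNat false

def pvSet2 (L : List (List Bool)) (j k : Int) (v : Bool) : List (List Bool) :=
  L.set j.toNat ((L.getD j.toNat []).set k.toNat v)

-- the net value the three sequential statements of A's inner loop body leave in dp[i][j][k]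
-- (dp[i][j][k] = dp[i-1][j][k]; then the two guarded 'or'-updates reading only layer i-1)
def pvACell (prev : List (List Bool)) (a j k : Int) : Bool :=
  let v := pvGet2 prev j k
  let v := if a ≤ j then v || pvGet2 prev (j - a) k else v
  if a ≤ k then v || pvGet2 prev j (k - a) else v

-- A's two inner loops over j and k for a fixed i: layer i (cur) is mutated cell by cell,
-- reading only layer i-1 (prev)
def pvALayer (prev cur : List (List Bool)) (a target : Int) : List (List Bool) :=
  (PySem.List.pyRange 0 (target + 1)).foldl (fun cur j =>
    (PySem.List.pyRange 0 (target + 1)).foldl (fun cur k =>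
      pvSet2 cur j k (pvACell prev a j k)) cur) cur

def partition3_dp (arr : List Int) : Bool × Option (List (List (List Bool))) :=
  let total := arr.sum
  let n := arr.length
  if PySem.Int.mod total 3 ≠ 0 then (false, none)
  else
    let dp0 := (PySem.List.pyRange 0 ((n : Int) + 1)).map (fun _ =>
      (PySem.List.pyRange 0 (total + 1)).map (fun _ =>
        (PySem.List.pyRange 0 (total + 1)).map (fun _ => false)))
    let dp1 := dp0.set 0 (pvSet2 (dp0.getD 0 []) 0 0 true)
    let target := PySem.Int.floordiv total 3
    let dpF := (PySem.List.pyRange 1 ((n : Int) + 1)).foldl (fun dp i =>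
      dp.set i.toNat (pvALayer (dp.getD (i - 1).toNat []) (dp.getD i.toNat [])
        ((PySem.List.pyGet? arr (i - 1)).getD 0) target)) dp1
    (pvGet2 (dpF.getD n []) target target, some dpF)

-- ===== PORT B =====
-- body of Source B's 'for j, k in list(first)' loop: the two range/novelty-guarded insertions of
-- the current index i for one snapshot pair p ('first[q] = i' when q not yet in first)
def pvBBody (target i a : Int) (d : PySem.Dict (Int × Int) Int) (p : Int × Int) :
    PySem.Dict (Int × Int) Int :=
  let d := if 0 ≤ p.1 + a ∧ p.1 + a ≤ target ∧ ¬ d.contains (p.1 + a, p.2)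
           then d.insert (p.1 + a, p.2) i else d
  if 0 ≤ p.2 + a ∧ p.2 + a ≤ target ∧ ¬ d.contains (p.1, p.2 + a)
  then d.insert (p.1, p.2 + a) i else d

-- one element of the 'for i, a in enumerate(arr, 1)' loop: iterate over the key snapshot
-- list(first), mutating first
def pvBStepD (target i a : Int) (d : PySem.Dict (Int × Int) Int) : PySem.Dict (Int × Int) Int :=
  d.keys.foldl (pvBBody target i a) d

def partition3_dp_alt (arr : List Int) : Bool × Option (List (List (List Bool))) :=
  let total := arr.sum
  let n := arr.length
  if PySem.Int.mod total 3 ≠ 0 then (false, none)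
  else
    let target := PySem.Int.floordiv total 3
    let first : PySem.Dict (Int × Int) Int :=
      PySem.Dict.ofList [((((0 : Int), (0 : Int))), (0 : Int))]
    let first := (PySem.List.enumerate arr 1).foldl
      (fun d ia => pvBStepD target ia.1 ia.2 d) first
    let dp := (PySem.List.pyRange 0 ((n : Int) + 1)).map (fun i =>
      (PySem.List.pyRange 0 (total + 1)).map (fun j =>
        (PySem.List.pyRange 0 (total + 1)).map (fun k =>
          first.contains (j, k) && decide (first.getD (j, k) 0 ≤ i))))
    (first.contains (target, target) && decide (first.getD (target, target) 0 ≤ (n : Int)),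
     some dp)

-- ===== PRECONDITION & SPEC =====
-- Pre_ excludes exactly the inputs on which Python A can raise: sum(arr) < 0 with sum % 3 == 0
-- (the 1+sum-sized table is empty, dp[0][0][0] is an IndexError), and arrays whose sum is a
-- nonnegative multiple of 3 containing an element a < -2*(sum//3), where A's lookup index j-a
-- can exceed the table size and raise IndexError unless boolean short-circuiting happens to
-- mask it (a conservative exclusion: on the masked inputs A returns and agrees with B).
def Pre_partition3_dp (arr : List Int) : Prop :=
  PySem.Int.mod arr.sum 3 ≠ 0 ∨ (0 ≤ arr.sum ∧ ∀ a ∈ arr, -2 * arr.sum ≤ 3 * a)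
instance (arr : List Int) : Decidable (Pre_partition3_dp arr) := by
  unfold Pre_partition3_dp; infer_instance

def pvWitness_partition3_dp : List Int := [1, 2, 3, 3]

def Spec_partition3_dp (arr : List Int) (out : Bool × Option (List (List (List Bool)))) : Prop := out = partition3_dp_alt arr
instance (arr : List Int) (out : Bool × Option (List (List (List Bool)))) : Decidable (Spec_partition3_dp arr out) := by unfold Spec_partition3_dp; infer_instance

-- ===== CLAIM (what is proved, stated in full; the proofs are below) =====
def Claim_equal_partition3_dp : Prop := ∀ (arr : List Int), Dom_partition3_dp arr → Pre_partition3_dp arr → Spec_partition3_dp arr (partition3_dp arr)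

-- ===== LEMMAS AND PROOFS =====

def pvFalseLayer (m : Nat) : List (List Bool) := List.replicate m (List.replicate m false)

def pvShaped (m : Nat) (L : List (List Bool)) : Prop := L.length = m ∧ ∀ r ∈ L, r.length = m

def pvMatches (L : List (List Bool)) (s : List (Int × Int)) : Prop :=
  ∀ j k : Nat, pvGet2 L j k = decide (((j : Int), (k : Int)) ∈ s)

lemma pvMap_pyRange_const {α : Type} (m : Nat) (x : α) :
    (PySem.List.pyRange 0 (m : Int)).map (fun _ => x) = List.replicate m x := by
  rw [PySem.List.pyRange_zero_natCast]
  rw [List.map_map]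
  simp only [Function.comp_def]
  rw [List.map_const' (l := List.range m) (b := x), List.length_range]

lemma pvGet2_falseLayer (m : Nat) (j k : Int) : pvGet2 (pvFalseLayer m) j k = false := by
  simp [pvGet2, pvFalseLayer, List.getD]
  rcases h : (List.replicate m (List.replicate m false))[j.toNat]? with _ | r
  · simp
  · have := List.mem_of_getElem? h
    rw [List.eq_of_mem_replicate this]
    rcases h2 : (List.replicate m false)[k.toNat]? with _ | b
    · simp
    · simp only [Option.getD_some, h2]
      rw [List.eq_of_mem_replicate (List.mem_of_getElem? h2)]

lemma pvShaped_falseLayer (m : Nat) : pvShaped m (pvFalseLayer m) := by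
  constructor
  · simp [pvFalseLayer]
  · intro r hr
    rw [List.eq_of_mem_replicate hr]
    simp

lemma pvShaped_set2 (m : Nat) (L : List (List Bool)) (hL : pvShaped m L) (j k : Nat)
    (hj : j < m) (v : Bool) : pvShaped m (pvSet2 L j k v) := by
  obtain ⟨h1, h2⟩ := hL
  constructor
  · simp [pvSet2, h1]
  · intro r hr
    simp [pvSet2] at hr
    rcases List.mem_or_eq_of_mem_set hr with h | h
    · exact h2 r h
    · subst h
      rw [List.length_set]
      apply h2
      have hlt : j < L.length := by omega
      rw [List.getElem?_eq_getElem hlt]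
      exact List.getElem_mem _

lemma pvGetD_set_self {α : Type} (l : List α) (i : Nat) (hi : i < l.length) (a d : α) :
    (l.set i a).getD i d = a := by
  simp [List.getD_eq_getElem?_getD, List.getElem?_set_self hi]

lemma pvGetD_set_ne {α : Type} (l : List α) (i i' : Nat) (h : i ≠ i') (a : α) (d : α) :
    (l.set i a).getD i' d = l.getD i' d := by
  simp [List.getD_eq_getElem?_getD, List.getElem?_set_ne h]

lemma pvGet2_set2 (m : Nat) (L : List (List Bool)) (hL : pvShaped m L) (j k j' k' : Nat)
    (hj : j < m) (hk : k < m) (v : Bool) :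
    pvGet2 (pvSet2 L j k v) j' k' = if j' = j ∧ k' = k then v else pvGet2 L j' k' := by
  obtain ⟨h1, h2⟩ := hL
  have hjL : j < L.length := by omega
  have hrL : (L.getD j []).length = m := by
    rw [List.getD_eq_getElem _ _ hjL]
    exact h2 _ (List.getElem_mem _)
  simp only [pvGet2, pvSet2, Int.toNat_natCast]
  by_cases hjj : j' = j
  · rw [hjj, pvGetD_set_self L j hjL]
    by_cases hkk : k' = k
    · rw [hkk, pvGetD_set_self _ k (by omega) v false, if_pos ⟨rfl, rfl⟩]
    · rw [pvGetD_set_ne _ k k' (by omega) v false, if_neg (by tauto)]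
  · rw [pvGetD_set_ne L j j' (by omega), if_neg (by tauto)]

lemma pvInner (prev : List (List Bool)) (a target : Int) (m : Nat) (j : Nat)
    (_hj : (j : Int) ≤ target) (hjm : j < m) :
    ∀ (K : Nat) (cur : List (List Bool)), pvShaped m cur → (K : Int) ≤ target + 1 → K ≤ m →
    pvShaped m ((PySem.List.pyRange 0 (K : Int)).foldl
        (fun cur k => pvSet2 cur (j : Int) k (pvACell prev a (j : Int) k)) cur) ∧
    ∀ j' k' : Nat,
      pvGet2 ((PySem.List.pyRange 0 (K : Int)).foldl
        (fun cur k => pvSet2 cur (j : Int) k (pvACell prev a (j : Int) k)) cur) j' k' =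
      if j' = j ∧ k' < K then pvACell prev a (j : Int) (k' : Int) else pvGet2 cur j' k' := by
  intro K
  induction K with
  | zero =>
    intro cur hc _ _
    simp only [Nat.cast_zero]
    rw [show PySem.List.pyRange 0 0 = [] from rfl]
    refine ⟨hc, ?_⟩
    intro j' k'
    simp
  | succ K ih =>
    intro cur hc hK hKm
    have hrange : PySem.List.pyRange 0 ((K + 1 : Nat) : Int) =
        PySem.List.pyRange 0 (K : Int) ++ [(K : Int)] := by
      push_cast
      exact PySem.List.pyRange_one_succ_right (by positivity)
    have hK' : (K : Int) ≤ target + 1 := by push_cast at hK ⊢; omega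
    have hKm' : K ≤ m := by omega
    obtain ⟨ihS, ihG⟩ := ih cur hc hK' hKm'
    rw [hrange, List.foldl_append, List.foldl_cons, List.foldl_nil]
    have hKltm : K < m := by omega
    refine ⟨pvShaped_set2 m _ ihS j K hjm _, ?_⟩
    intro j' k'
    rw [pvGet2_set2 m _ ihS j K j' k' hjm hKltm _]
    rw [ihG j' k']
    by_cases h1 : j' = j
    · by_cases h2 : k' = K
      · simp [h1, h2]
      · by_cases h3 : k' < K
        · simp [h1, h2, h3, Nat.le_of_lt h3]
        · have h4 : ¬ k' < K + 1 := by omega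
          simp [h1, h2, h3, h4]
    · simp [h1]

lemma pvOuter (prev : List (List Bool)) (a : Int) (tgn m : Nat) (hm : tgn < m) :
    ∀ (J : Nat) (cur : List (List Bool)), pvShaped m cur → J ≤ tgn + 1 →
    pvShaped m ((PySem.List.pyRange 0 (J : Int)).foldl (fun cur j =>
        (PySem.List.pyRange 0 ((tgn + 1 : Nat) : Int)).foldl
          (fun cur k => pvSet2 cur j k (pvACell prev a j k)) cur) cur) ∧
    ∀ j' k' : Nat,
      pvGet2 ((PySem.List.pyRange 0 (J : Int)).foldl (fun cur j =>
        (PySem.List.pyRange 0 ((tgn + 1 : Nat) : Int)).foldl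
          (fun cur k => pvSet2 cur j k (pvACell prev a j k)) cur) cur) j' k' =
      if j' < J ∧ k' ≤ tgn then pvACell prev a (j' : Int) (k' : Int) else pvGet2 cur j' k' := by
  intro J
  induction J with
  | zero =>
    intro cur hc _
    simp only [Nat.cast_zero]
    rw [show PySem.List.pyRange 0 0 = [] from rfl]
    exact ⟨hc, fun j' k' => by simp⟩
  | succ J ih =>
    intro cur hc hJ
    have hrange : PySem.List.pyRange 0 ((J + 1 : Nat) : Int) =
        PySem.List.pyRange 0 (J : Int) ++ [(J : Int)] := by
      push_cast
      exact PySem.List.pyRange_one_succ_right (by positivity)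
    obtain ⟨ihS, ihG⟩ := ih cur hc (by omega)
    rw [hrange, List.foldl_append, List.foldl_cons, List.foldl_nil]
    have hJt : (J : Int) ≤ (tgn : Int) := by exact_mod_cast Nat.lt_succ_iff.mp (by omega)
    have hJm : J < m := by omega
    obtain ⟨innS, innG⟩ := pvInner prev a (tgn : Int) m J hJt hJm (tgn + 1) _ ihS
      (by push_cast; omega) (by omega)
    refine ⟨innS, ?_⟩
    intro j' k'
    rw [innG j' k', ihG j' k']
    by_cases h1 : j' = J
    · by_cases h2 : k' ≤ tgn
      · simp [h1, h2]
      · have h3 : ¬ k' < tgn + 1 := by omega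
        have h4 : ¬ j' < J := by omega
        simp [h1, h2, h3]
    · by_cases h4 : j' < J
      · have : j' < J + 1 := by omega
        simp [h1, h4, this]
      · have : ¬ j' < J + 1 := by omega
        simp [h1, h4, this]

def pvCond (target a : Int) (p q : Int × Int) : Prop :=
  (0 ≤ p.1 + a ∧ p.1 + a ≤ target ∧ q = (p.1 + a, p.2)) ∨
  (0 ≤ p.2 + a ∧ p.2 + a ≤ target ∧ q = (p.1, p.2 + a))

-- the reachable-pair step as a plain set image (proof-side abstraction of one dp layer)
def pvBStep (target a : Int) (s : PySem.Set (Int × Int)) : PySem.Set (Int × Int) :=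
  s.foldl (fun nxt p =>
    let nxt := if 0 ≤ p.1 + a ∧ p.1 + a ≤ target then PySem.Set.add nxt (p.1 + a, p.2) else nxt
    if 0 ≤ p.2 + a ∧ p.2 + a ≤ target then PySem.Set.add nxt (p.1, p.2 + a) else nxt) s

lemma pvMem_stepFold (target a : Int) :
    ∀ (l : List (Int × Int)) (acc : PySem.Set (Int × Int)) (q : Int × Int),
    (q ∈ l.foldl (fun nxt p =>
      let nxt := if 0 ≤ p.1 + a ∧ p.1 + a ≤ target then PySem.Set.add nxt (p.1 + a, p.2) else nxt
      if 0 ≤ p.2 + a ∧ p.2 + a ≤ target then PySem.Set.add nxt (p.1, p.2 + a) else nxt) acc) ↔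
    q ∈ acc ∨ ∃ p ∈ l, pvCond target a p q := by
  intro l
  induction l with
  | nil => intro acc q; simp
  | cons p t ih =>
    intro acc q
    rw [List.foldl_cons, ih]
    constructor
    · rintro (hmem | ⟨r, hr, hc⟩)
      · split_ifs at hmem with h1 h2 h2 <;>
          simp only [PySem.Set.mem_add] at hmem <;>
          [skip; skip; skip; skip] <;>
          first
          | (rcases hmem with (hmem | he)
             · first
               | (rcases hmem with (hmem | he2)
                  · exact Or.inl hmem
                  · exact Or.inr ⟨p, List.mem_cons_self, Or.inl ⟨h1.1, h1.2, he2⟩⟩)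
               | exact Or.inl hmem
             · exact Or.inr ⟨p, List.mem_cons_self, Or.inr ⟨h2.1, h2.2, he⟩⟩)
          | (rcases hmem with (hmem | he)
             · exact Or.inl hmem
             · exact Or.inr ⟨p, List.mem_cons_self, Or.inl ⟨h1.1, h1.2, he⟩⟩)
          | exact Or.inl hmem
      · exact Or.inr ⟨r, List.mem_cons_of_mem _ hr, hc⟩
    · rintro (hmem | ⟨r, hr, hc⟩)
      · left
        split_ifs <;> simp only [PySem.Set.mem_add] <;> tauto
      · rcases List.mem_cons.mp hr with rfl | hrt
        · left
          rcases hc with ⟨hb1, hb2, rfl⟩ | ⟨hb1, hb2, rfl⟩ <;>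
            split_ifs with h1 h2 <;> simp only [PySem.Set.mem_add] <;> tauto
        · exact Or.inr ⟨r, hrt, hc⟩

lemma pvMem_step (target a : Int) (s : PySem.Set (Int × Int)) (q : Int × Int) :
    q ∈ pvBStep target a s ↔ q ∈ s ∨ ∃ p ∈ s, pvCond target a p q :=
  pvMem_stepFold target a s s q

def pvInRange (target : Int) (s : List (Int × Int)) : Prop :=
  ∀ p ∈ s, 0 ≤ p.1 ∧ p.1 ≤ target ∧ 0 ≤ p.2 ∧ p.2 ≤ target

lemma pvInRange_step (target a : Int) (s : PySem.Set (Int × Int)) (hs : pvInRange target s) :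
    pvInRange target (pvBStep target a s) := by
  intro q hq
  rcases (pvMem_step target a s q).mp hq with h | ⟨p, hp, hc⟩
  · exact hs q h
  · obtain ⟨h1, h2, h3, h4⟩ := hs p hp
    rcases hc with ⟨hb1, hb2, rfl⟩ | ⟨hb1, hb2, rfl⟩ <;>
      exact ⟨by omega, by omega, by omega, by omega⟩

lemma pvCell_step (prev : List (List Bool)) (s : PySem.Set (Int × Int)) (target a : Int)
    (hm : pvMatches prev s) (hr : pvInRange target s) (j k : Nat)
    (hj : (j : Int) ≤ target) (hk : (k : Int) ≤ target) :
    pvACell prev a (j : Int) (k : Int) = decide (((j : Int), (k : Int)) ∈ pvBStep target a s) := by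
  have hmem : ∀ (x y : Int), 0 ≤ x → 0 ≤ y → (pvGet2 prev x y = decide ((x, y) ∈ s)) := by
    intro x y hx hy
    have := hm x.toNat y.toNat
    rwa [Int.toNat_of_nonneg hx, Int.toNat_of_nonneg hy] at this
  have e1 := hmem (j : Int) (k : Int) (by positivity) (by positivity)
  have hex : (∃ p ∈ s, pvCond target a p ((j : Int), (k : Int))) ↔
      ((a ≤ (j : Int) ∧ ((j : Int) - a, (k : Int)) ∈ s) ∨
       (a ≤ (k : Int) ∧ ((j : Int), (k : Int) - a) ∈ s)) := by
    constructor
    · rintro ⟨⟨p1, p2⟩, hp, ⟨hb1, hb2, heq⟩ | ⟨hb1, hb2, heq⟩⟩ <;>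
        obtain ⟨hp1, _, hp3, _⟩ := hr _ hp <;>
        simp only [Prod.mk.injEq] at hp1 hp3 heq ⊢ <;>
        obtain ⟨he1, he2⟩ := heq
      · left
        refine ⟨by omega, ?_⟩
        have hpe : ((j : Int) - a, (k : Int)) = (p1, p2) := by
          simp only [Prod.mk.injEq]
          omega
        rw [hpe]; exact hp
      · right
        refine ⟨by omega, ?_⟩
        have hpe : ((j : Int), (k : Int) - a) = (p1, p2) := by
          simp only [Prod.mk.injEq]
          omega
        rw [hpe]; exact hp
    · rintro (⟨ha, hs1⟩ | ⟨ha, hs1⟩)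
      · exact ⟨((j : Int) - a, (k : Int)), hs1, Or.inl
          ⟨show (0 : Int) ≤ (j : Int) - a + a by omega,
           show (j : Int) - a + a ≤ target by omega,
           show ((j : Int), (k : Int)) = ((j : Int) - a + a, (k : Int)) by
             rw [Prod.mk.injEq]; exact ⟨by omega, rfl⟩⟩⟩
      · exact ⟨((j : Int), (k : Int) - a), hs1, Or.inr
          ⟨show (0 : Int) ≤ (k : Int) - a + a by omega,
           show (k : Int) - a + a ≤ target by omega,
           show ((j : Int), (k : Int)) = ((j : Int), (k : Int) - a + a) by
             rw [Prod.mk.injEq]; exact ⟨rfl, by omega⟩⟩⟩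
  rw [Bool.eq_iff_iff]
  simp only [decide_eq_true_iff]
  rw [pvMem_step, hex]
  simp only [pvACell]
  by_cases h1 : a ≤ (j : Int) <;> by_cases h2 : a ≤ (k : Int)
  · have e2 := hmem ((j : Int) - a) (k : Int) (by omega) (by positivity)
    have e3 := hmem (j : Int) ((k : Int) - a) (by positivity) (by omega)
    simp only [h1, h2, if_true, e1, e2, e3, Bool.or_eq_true, decide_eq_true_iff]
    tauto
  · have e2 := hmem ((j : Int) - a) (k : Int) (by omega) (by positivity)
    simp only [h1, h2, if_true, if_false, e1, e2, Bool.or_eq_true, decide_eq_true_iff]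
    tauto
  · have e3 := hmem (j : Int) ((k : Int) - a) (by positivity) (by omega)
    simp only [h1, h2, if_true, if_false, e1, e3, Bool.or_eq_true, decide_eq_true_iff]
    tauto
  · simp only [h1, h2, if_false, e1, decide_eq_true_iff]
    tauto

lemma pvLayer_matches (prev : List (List Bool)) (s : PySem.Set (Int × Int)) (a : Int)
    (tgn T : Nat) (hT : tgn ≤ T) (hm : pvMatches prev s) (hr : pvInRange (tgn : Int) s) :
    pvShaped (T + 1) (pvALayer prev (pvFalseLayer (T + 1)) a (tgn : Int)) ∧
    pvMatches (pvALayer prev (pvFalseLayer (T + 1)) a (tgn : Int)) (pvBStep (tgn : Int) a s) := by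
  unfold pvALayer
  rw [show ((tgn : Int) + 1) = ((tgn + 1 : Nat) : Int) by push_cast; ring]
  obtain ⟨hS, hG⟩ := pvOuter prev a tgn (T + 1) (by omega) (tgn + 1)
    (pvFalseLayer (T + 1)) (pvShaped_falseLayer (T + 1)) (by omega)
  refine ⟨hS, ?_⟩
  intro j k
  rw [hG j k]
  by_cases hj : j < tgn + 1
  · by_cases hk : k ≤ tgn
    · rw [if_pos ⟨hj, hk⟩]
      exact pvCell_step prev s (tgn : Int) a hm hr j k (by exact_mod_cast Nat.lt_succ_iff.mp hj)
        (by exact_mod_cast hk)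
    · rw [if_neg (by tauto), pvGet2_falseLayer]
      have : ¬ (((j : Int), (k : Int)) ∈ pvBStep (tgn : Int) a s) := by
        intro hmem
        obtain ⟨_, _, _, h4⟩ := pvInRange_step (tgn : Int) a s hr _ hmem
        simp only at h4
        omega
      simp [this]
  · rw [if_neg (by tauto), pvGet2_falseLayer]
    have : ¬ (((j : Int), (k : Int)) ∈ pvBStep (tgn : Int) a s) := by
      intro hmem
      obtain ⟨_, h2, _, _⟩ := pvInRange_step (tgn : Int) a s hr _ hmem
      simp only at h2
      omega
    simp [this]

def pvLayerSets (target : Int) (s : PySem.Set (Int × Int)) : List Int → List (PySem.Set (Int × Int))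
  | [] => [s]
  | x :: t => s :: pvLayerSets target (pvBStep target x s) t

lemma pvLayerSets_zero (target : Int) (l : List Int) (s : PySem.Set (Int × Int)) :
    (pvLayerSets target s l).getD 0 [] = s := by
  cases l <;> rfl

lemma pvLayerSets_succ (target : Int) :
    ∀ (l : List Int) (s : PySem.Set (Int × Int)) (i : Nat), i < l.length →
    (pvLayerSets target s l).getD (i + 1) [] =
      pvBStep target (l.getD i 0) ((pvLayerSets target s l).getD i []) := by
  intro l
  induction l with
  | nil => intro s i h; simp at h
  | cons x t ih =>
    intro s i h
    cases i with
    | zero =>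
      simp only [pvLayerSets, List.getD_cons_succ, List.getD_cons_zero, pvLayerSets_zero]
    | succ i =>
      simp only [pvLayerSets, List.getD_cons_succ]
      exact ih (pvBStep target x s) i (by simpa using h)

lemma pvLayerSets_inRange (target : Int) :
    ∀ (l : List Int) (s : PySem.Set (Int × Int)), pvInRange target s →
    ∀ i : Nat, pvInRange target ((pvLayerSets target s l).getD i []) := by
  intro l
  induction l with
  | nil =>
    intro s hs i
    cases i with
    | zero => exact hs
    | succ i => intro p hp; simp [pvLayerSets, List.getD] at hp
  | cons x t ih =>
    intro s hs i
    cases i with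
    | zero => exact hs
    | succ i =>
      simp only [pvLayerSets, List.getD_cons_succ]
      exact ih _ (pvInRange_step target x s hs) i

-- ==== B-side: the earliest-reach dictionary vs the layer sets ====

def pvD0 : PySem.Dict (Int × Int) Int := PySem.Dict.ofList [((((0 : Int), (0 : Int))), (0 : Int))]

lemma pvD0_get? (q : Int × Int) :
    pvD0.get? q = if q = ((0 : Int), (0 : Int)) then some 0 else none := by
  have h : pvD0 = PySem.Dict.empty.insert ((0 : Int), (0 : Int)) (0 : Int) := rfl
  rw [h, PySem.Dict.get?_insert]
  split_ifs <;> simp [PySem.Dict.get?_empty]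

-- one guarded insert, characterised: it adds key q0 with value i exactly when q0 is new
lemma pvMove (d acc : PySem.Dict (Int × Int) Int) (i : Int) (P : (Int × Int) → Prop)
    (hH : ∀ q e, acc.get? q = some e ↔
      d.get? q = some e ∨ (d.get? q = none ∧ e = i ∧ P q))
    (R S : Prop) [Decidable R] [Decidable S] (q0 : Int × Int) :
    ∀ q e, ((if R ∧ S ∧ ¬ acc.contains q0 then acc.insert q0 i else acc).get? q = some e) ↔
      d.get? q = some e ∨ (d.get? q = none ∧ e = i ∧ (P q ∨ ((R ∧ S) ∧ q = q0))) := by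
  intro q e
  have hcont : ∀ q', acc.contains q' = true ↔ ∃ v, acc.get? q' = some v := by
    intro q'
    rw [PySem.Dict.contains_eq_isSome_get?, Option.isSome_iff_exists]
  by_cases hg : R ∧ S ∧ ¬ acc.contains q0
  · rw [if_pos hg]
    obtain ⟨hR, hS, hnc⟩ := hg
    have hnone : acc.get? q0 = none := by
      rcases h : acc.get? q0 with _ | v
      · rfl
      · exact absurd ((hcont q0).mpr ⟨v, h⟩) (by simpa using hnc)
    have hdnone : d.get? q0 = none := by
      rcases h : d.get? q0 with _ | v
      · rfl
      · have := (hH q0 v).mpr (Or.inl h)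
        rw [hnone] at this
        cases this
    rw [PySem.Dict.get?_insert]
    by_cases hq : q = q0
    · subst hq
      rw [if_pos rfl]
      constructor
      · intro h
        have he : e = i := (Option.some.inj h).symm
        exact Or.inr ⟨hdnone, he, Or.inr ⟨⟨hR, hS⟩, rfl⟩⟩
      · rintro (h | ⟨_, rfl, _⟩)
        · rw [hdnone] at h
          cases h
        · rfl
    · rw [if_neg hq, hH q e]
      constructor
      · rintro (h | ⟨h1, h2, h3⟩)
        · exact Or.inl h
        · exact Or.inr ⟨h1, h2, Or.inl h3⟩
      · rintro (h | ⟨h1, h2, h3 | ⟨_, h4⟩⟩)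
        · exact Or.inl h
        · exact Or.inr ⟨h1, h2, h3⟩
        · exact absurd h4 hq
  · rw [if_neg hg, hH q e]
    constructor
    · rintro (h | ⟨h1, h2, h3⟩)
      · exact Or.inl h
      · exact Or.inr ⟨h1, h2, Or.inl h3⟩
    · rintro (h | ⟨h1, h2, h3 | ⟨⟨hR, hS⟩, rfl⟩⟩)
      · exact Or.inl h
      · exact Or.inr ⟨h1, h2, h3⟩
      · -- the guard failed though R ∧ S hold: q0 is already a key of acc
        have hc : acc.contains q = true := by
          by_contra hc
          exact hg ⟨hR, hS, by simpa using hc⟩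
        obtain ⟨v, hv⟩ := (hcont q).mp hc
        rcases (hH q v).mp hv with h' | ⟨_, rfl, hP⟩
        · rw [h1] at h'
          cases h'
        · exact Or.inr ⟨h1, h2, hP⟩

lemma pvBBody_char (target i a : Int) (d acc : PySem.Dict (Int × Int) Int)
    (P : (Int × Int) → Prop)
    (hH : ∀ q e, acc.get? q = some e ↔
      d.get? q = some e ∨ (d.get? q = none ∧ e = i ∧ P q)) (p : Int × Int) :
    ∀ q e, ((pvBBody target i a acc p).get? q = some e) ↔
      d.get? q = some e ∨ (d.get? q = none ∧ e = i ∧ (P q ∨ pvCond target a p q)) := by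
  intro q e
  have h1 := pvMove d acc i P hH (0 ≤ p.1 + a) (p.1 + a ≤ target) (p.1 + a, p.2)
  have h2 := pvMove d _ i _ h1 (0 ≤ p.2 + a) (p.2 + a ≤ target) (p.1, p.2 + a) q e
  simp only [pvBBody]
  rw [h2]
  unfold pvCond
  tauto

lemma pvStepD_fold (target i a : Int) (d : PySem.Dict (Int × Int) Int) :
    ∀ (l : List (Int × Int)) (acc : PySem.Dict (Int × Int) Int) (P : (Int × Int) → Prop),
    (∀ q e, acc.get? q = some e ↔
      d.get? q = some e ∨ (d.get? q = none ∧ e = i ∧ P q)) →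
    ∀ q e, ((l.foldl (pvBBody target i a) acc).get? q = some e) ↔
      d.get? q = some e ∨ (d.get? q = none ∧ e = i ∧ (P q ∨ ∃ p ∈ l, pvCond target a p q)) := by
  intro l
  induction l with
  | nil =>
    intro acc P hH q e
    rw [List.foldl_nil, hH q e]
    simp
  | cons p t ih =>
    intro acc P hH q e
    rw [List.foldl_cons]
    have := ih (pvBBody target i a acc p)
      (fun q => P q ∨ pvCond target a p q) (pvBBody_char target i a d acc P hH p) q e
    rw [this]
    constructor
    · rintro (h | ⟨h1, h2, h3⟩)
      · exact Or.inl h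
      · refine Or.inr ⟨h1, h2, ?_⟩
        rcases h3 with (hP | hc) | ⟨r, hr, hc⟩
        · exact Or.inl hP
        · exact Or.inr ⟨p, List.mem_cons_self, hc⟩
        · exact Or.inr ⟨r, List.mem_cons_of_mem _ hr, hc⟩
    · rintro (h | ⟨h1, h2, h3⟩)
      · exact Or.inl h
      · refine Or.inr ⟨h1, h2, ?_⟩
        rcases h3 with hP | ⟨r, hr, hc⟩
        · exact Or.inl (Or.inl hP)
        · rcases List.mem_cons.mp hr with rfl | hrt
          · exact Or.inl (Or.inr hc)
          · exact Or.inr ⟨r, hrt, hc⟩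

lemma pvStepD_get? (target i a : Int) (d : PySem.Dict (Int × Int) Int) (q : Int × Int) (e : Int) :
    (pvBStepD target i a d).get? q = some e ↔
      d.get? q = some e ∨ (d.get? q = none ∧ e = i ∧ ∃ p ∈ d.keys, pvCond target a p q) := by
  unfold pvBStepD
  rw [pvStepD_fold target i a d d.keys d (fun _ => False) (by intro q e; simp) q e]
  tauto

def pvInit : PySem.Set (Int × Int) := PySem.Set.ofList [((0 : Int), (0 : Int))]

lemma pvInit_inRange (target : Int) (h : 0 ≤ target) : pvInRange target pvInit := by
  intro p hp
  rw [pvInit, PySem.Set.mem_ofList] at hp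
  simp only [List.mem_singleton] at hp
  subst hp
  exact ⟨le_refl _, h, le_refl _, h⟩

-- the dictionary after processing the first M elements of Source B's main loop
def pvDictSeq (arr : List Int) (target : Int) (M : Nat) : PySem.Dict (Int × Int) Int :=
  (PySem.List.enumerate (arr.take M) 1).foldl (fun d ia => pvBStepD target ia.1 ia.2 d) pvD0

lemma pvDictSeq_zero (arr : List Int) (target : Int) : pvDictSeq arr target 0 = pvD0 := rfl

lemma pvDictSeq_succ (arr : List Int) (target : Int) (M : Nat) (h : M < arr.length) :
    pvDictSeq arr target (M + 1) =
      pvBStepD target ((M : Int) + 1) (arr.getD M 0) (pvDictSeq arr target M) := by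
  unfold pvDictSeq
  rw [List.take_succ, List.getElem?_eq_getElem h]
  simp only [Option.toList_some]
  rw [PySem.List.enumerate_append, List.foldl_append, List.length_take]
  have hmin : min M arr.length = M := by omega
  rw [hmin]
  simp only [PySem.List.enumerate_cons, PySem.List.enumerate_nil, List.foldl_cons, List.foldl_nil]
  rw [List.getD_eq_getElem _ _ h]
  norm_num [add_comm]

-- invariant: dict values are bounded by M, and 'value ≤ t' membership is exactly layer t
lemma pvInvD (arr : List Int) (target : Int) :
    ∀ M : Nat, M ≤ arr.length →
    (∀ q e, (pvDictSeq arr target M).get? q = some e → 0 ≤ e ∧ e ≤ (M : Int)) ∧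
    (∀ t : Nat, t ≤ M → ∀ q,
      ((∃ e, (pvDictSeq arr target M).get? q = some e ∧ e ≤ (t : Int)) ↔
        q ∈ (pvLayerSets target pvInit arr).getD t [])) := by
  intro M
  induction M with
  | zero =>
    intro _
    constructor
    · intro q e h
      rw [pvDictSeq_zero, pvD0_get?] at h
      split_ifs at h with hq
      have : (0 : Int) = e := Option.some.inj h
      omega
    · intro t ht q
      interval_cases t
      rw [pvDictSeq_zero, pvLayerSets_zero]
      constructor
      · rintro ⟨e, he, _⟩
        rw [pvD0_get?] at he
        split_ifs at he with hq
        subst hq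
        rw [pvInit, PySem.Set.mem_ofList]
        exact List.mem_singleton.mpr rfl
      · intro hq
        rw [pvInit, PySem.Set.mem_ofList] at hq
        have hq0 : q = ((0 : Int), (0 : Int)) := List.mem_singleton.mp hq
        refine ⟨0, ?_, by norm_num⟩
        rw [pvD0_get?, if_pos hq0]
  | succ M ih =>
    intro hM
    obtain ⟨ihA, ihB⟩ := ih (by omega)
    have hseq := pvDictSeq_succ arr target M (by omega)
    have hchar := fun q e =>
      pvStepD_get? target ((M : Int) + 1) (arr.getD M 0) (pvDictSeq arr target M) q e
    have hkeys : ∀ p, p ∈ (pvDictSeq arr target M).keys ↔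
        ∃ e, (pvDictSeq arr target M).get? p = some e := by
      intro p
      constructor
      · intro hp
        rcases h' : (pvDictSeq arr target M).get? p with _ | e
        · exact absurd hp ((PySem.Dict.get?_eq_none_iff_not_mem_keys _ _).mp h')
        · exact ⟨e, rfl⟩
      · rintro ⟨e, he⟩
        by_contra hp
        rw [← PySem.Dict.get?_eq_none_iff_not_mem_keys, he] at hp
        cases hp
    have hmemM : ∀ r, r ∈ (pvLayerSets target pvInit arr).getD M [] ↔
        ∃ e, (pvDictSeq arr target M).get? r = some e ∧ e ≤ (M : Int) :=
      fun r => (ihB M le_rfl r).symm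
    constructor
    · intro q e h
      rw [hseq] at h
      rcases (hchar q e).mp h with hold | ⟨_, rfl, _⟩
      · have := ihA q e hold
        constructor
        · exact this.1
        · have : e ≤ (M : Int) := this.2
          push_cast
          omega
      · constructor <;> [positivity; (push_cast; omega)]
    · intro t ht q
      rw [hseq]
      by_cases htM : t ≤ M
      · rw [← ihB t htM q]
        constructor
        · rintro ⟨e, he, het⟩
          rcases (hchar q e).mp he with hold | ⟨_, rfl, _⟩
          · exact ⟨e, hold, het⟩
          · exfalso
            have : (t : Int) ≤ (M : Int) := by exact_mod_cast htM
            omega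
        · rintro ⟨e, he, het⟩
          exact ⟨e, (hchar q e).mpr (Or.inl he), het⟩
      · have htM1 : t = M + 1 := by omega
        subst htM1
        rw [pvLayerSets_succ target arr pvInit M (by omega), pvMem_step]
        constructor
        · rintro ⟨e, he, het⟩
          rcases (hchar q e).mp he with hold | ⟨hnone, rfl, p, hp, hc⟩
          · left
            exact (hmemM q).mpr ⟨e, hold, (ihA q e hold).2⟩
          · right
            obtain ⟨e', he'⟩ := (hkeys p).mp hp
            exact ⟨p, (hmemM p).mpr ⟨e', he', (ihA p e' he').2⟩, hc⟩
        · intro hmem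
          by_cases hqM : q ∈ (pvLayerSets target pvInit arr).getD M []
          · obtain ⟨e, he, het⟩ := (hmemM q).mp hqM
            refine ⟨e, (hchar q e).mpr (Or.inl he), ?_⟩
            push_cast
            omega
          · rcases hmem with h | ⟨p, hp, hc⟩
            · exact absurd h hqM
            · have hnone : (pvDictSeq arr target M).get? q = none := by
                rcases h' : (pvDictSeq arr target M).get? q with _ | e
                · rfl
                · exact absurd ((hmemM q).mpr ⟨e, h', (ihA q e h').2⟩) hqM
              obtain ⟨e', he'⟩ := (hmemM p).mp hp
              refine ⟨(M : Int) + 1,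
                (hchar q ((M : Int) + 1)).mpr
                  (Or.inr ⟨hnone, rfl, p, (hkeys p).mpr ⟨e', he'.1⟩, hc⟩), by push_cast; omega⟩

-- the cell Source B reads off the finished map equals layer-t membership
lemma pvCellB (arr : List Int) (target : Int) (t : Nat) (ht : t ≤ arr.length) (q : Int × Int) :
    ((pvDictSeq arr target arr.length).contains q &&
      decide ((pvDictSeq arr target arr.length).getD q 0 ≤ (t : Int))) =
    decide (q ∈ (pvLayerSets target pvInit arr).getD t []) := by
  obtain ⟨hA, hB⟩ := pvInvD arr target arr.length le_rfl
  have hiff := hB t ht q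
  rcases h : (pvDictSeq arr target arr.length).get? q with _ | e
  · have hc : (pvDictSeq arr target arr.length).contains q = false := by
      rw [PySem.Dict.contains_eq_isSome_get?, h]
      rfl
    rw [hc]
    have : ¬ q ∈ (pvLayerSets target pvInit arr).getD t [] := by
      intro hmem
      obtain ⟨e, he, _⟩ := hiff.mpr hmem
      rw [h] at he
      cases he
    rw [Bool.false_and]
    exact (decide_eq_false this).symm
  · have hc : (pvDictSeq arr target arr.length).contains q = true := by
      rw [PySem.Dict.contains_eq_isSome_get?, h]
      rfl
    have hg : (pvDictSeq arr target arr.length).getD q 0 = e := by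
      rw [PySem.Dict.getD_eq_get?_getD, h]
      rfl
    rw [hc, hg, Bool.true_and]
    have : (e ≤ (t : Int)) ↔ q ∈ (pvLayerSets target pvInit arr).getD t [] := by
      rw [← hiff]
      constructor
      · intro het
        exact ⟨e, h, het⟩
      · rintro ⟨e', he', het⟩
        rw [h] at he'
        have : e' = e := Option.some.inj he'.symm
        omega
    exact decide_eq_decide.mpr this

-- ==== assembling the two outputs ====

def pvBody (arr : List Int) (tgn : Nat) (dp : List (List (List Bool))) (i : Int) :
    List (List (List Bool)) :=
  dp.set i.toNat (pvALayer (dp.getD (i - 1).toNat []) (dp.getD i.toNat [])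
    ((PySem.List.pyGet? arr (i - 1)).getD 0) (tgn : Int))

def pvDP1 (n T : Nat) : List (List (List Bool)) :=
  (List.replicate (n + 1) (pvFalseLayer (T + 1))).set 0 (pvSet2 (pvFalseLayer (T + 1)) 0 0 true)

def pvDP (arr : List Int) (T tgn M : Nat) : List (List (List Bool)) :=
  (PySem.List.pyRange 1 ((M : Int) + 1)).foldl (pvBody arr tgn) (pvDP1 arr.length T)

lemma pvDP1_matches (n T : Nat) :
    (pvDP1 n T).length = n + 1 ∧
    pvShaped (T + 1) ((pvDP1 n T).getD 0 []) ∧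
    pvMatches ((pvDP1 n T).getD 0 []) pvInit ∧
    (∀ i : Nat, 0 < i → i ≤ n → (pvDP1 n T).getD i [] = pvFalseLayer (T + 1)) := by
  have hlen : (List.replicate (n + 1) (pvFalseLayer (T + 1))).length = n + 1 := by simp
  have h0 : (pvDP1 n T).getD 0 [] = pvSet2 (pvFalseLayer (T + 1)) 0 0 true := by
    unfold pvDP1
    exact pvGetD_set_self _ 0 (by omega) _ _
  refine ⟨by simp [pvDP1], ?_, ?_, ?_⟩
  · rw [h0]
    have := pvShaped_set2 (T + 1) (pvFalseLayer (T + 1)) (pvShaped_falseLayer (T + 1)) 0 0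
      (by omega) true
    simpa using this
  · rw [h0]
    intro j k
    have := pvGet2_set2 (T + 1) (pvFalseLayer (T + 1)) (pvShaped_falseLayer (T + 1)) 0 0 j k
      (by omega) (by omega) true
    simp only [Nat.cast_zero] at this
    rw [this]
    by_cases hj : j = 0 <;> by_cases hk : k = 0 <;>
      simp [hj, hk, pvInit, PySem.Set.mem_ofList, pvGet2_falseLayer, Prod.ext_iff]
  · intro i h1 h2
    unfold pvDP1
    rw [pvGetD_set_ne _ 0 i (by omega) _ _]
    rw [List.getD_eq_getElem _ _ (by simp; omega)]
    simp

lemma pvAFold (arr : List Int) (T tgn : Nat) (hT : tgn ≤ T) :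
    ∀ M : Nat, M ≤ arr.length →
    (pvDP arr T tgn M).length = arr.length + 1 ∧
    (∀ i : Nat, i ≤ M →
      pvShaped (T + 1) ((pvDP arr T tgn M).getD i []) ∧
      pvMatches ((pvDP arr T tgn M).getD i [])
        ((pvLayerSets (tgn : Int) pvInit arr).getD i [])) ∧
    (∀ i : Nat, M < i → i ≤ arr.length → (pvDP arr T tgn M).getD i [] = pvFalseLayer (T + 1)) := by
  intro M
  induction M with
  | zero =>
    intro _
    obtain ⟨hlen, hsh, hmat, hrest⟩ := pvDP1_matches arr.length T
    have hdp : pvDP arr T tgn 0 = pvDP1 arr.length T := by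
      unfold pvDP
      norm_num
    rw [hdp]
    refine ⟨hlen, ?_, fun i h1 h2 => hrest i h1 h2⟩
    intro i hi
    interval_cases i
    rw [pvLayerSets_zero]
    exact ⟨hsh, hmat⟩
  | succ M ih =>
    intro hM
    have hM' : M ≤ arr.length := by omega
    obtain ⟨ihlen, ihmat, ihrest⟩ := ih hM'
    have hdp : pvDP arr T tgn (M + 1) = pvBody arr tgn (pvDP arr T tgn M) ((M : Int) + 1) := by
      unfold pvDP
      rw [show (((M + 1 : Nat) : Int) + 1) = ((M : Int) + 1) + 1 by push_cast; ring,
        PySem.List.pyRange_one_succ_right (by omega), List.foldl_append, List.foldl_cons,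
        List.foldl_nil]
    have htoNat : ((M : Int) + 1).toNat = M + 1 := by omega
    have htoNat' : ((M : Int) + 1 - 1).toNat = M := by omega
    have harr : ((PySem.List.pyGet? arr ((M : Int) + 1 - 1)).getD 0) = arr.getD M 0 := by
      rw [show ((M : Int) + 1 - 1) = ((M : Nat) : Int) by ring]
      rw [PySem.List.pyGet?_natCast]
      rw [List.getD_eq_getElem?_getD]
    have hcur : (pvDP arr T tgn M).getD (M + 1) [] = pvFalseLayer (T + 1) :=
      ihrest (M + 1) (by omega) (by omega)
    obtain ⟨hshM, hmatM⟩ := ihmat M (le_refl M)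
    have hinr : pvInRange (tgn : Int) ((pvLayerSets (tgn : Int) pvInit arr).getD M []) :=
      pvLayerSets_inRange (tgn : Int) arr pvInit (pvInit_inRange _ (by positivity)) M
    obtain ⟨hshL, hmatL⟩ := pvLayer_matches ((pvDP arr T tgn M).getD M [])
      ((pvLayerSets (tgn : Int) pvInit arr).getD M []) (arr.getD M 0) tgn T hT hmatM hinr
    have hsucc : (pvLayerSets (tgn : Int) pvInit arr).getD (M + 1) [] =
        pvBStep (tgn : Int) (arr.getD M 0) ((pvLayerSets (tgn : Int) pvInit arr).getD M []) :=
      pvLayerSets_succ (tgn : Int) arr pvInit M (by omega)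
    rw [hdp]
    unfold pvBody
    rw [htoNat, htoNat', harr, hcur]
    constructor
    · simp [ihlen]
    constructor
    · intro i hi
      by_cases hiM : i = M + 1
      · subst hiM
        rw [pvGetD_set_self _ (M + 1) (by omega) _ _, hsucc]
        exact ⟨hshL, hmatL⟩
      · rw [pvGetD_set_ne _ (M + 1) i (by omega) _ _]
        exact ihmat i (by omega)
    · intro i h1 h2
      rw [pvGetD_set_ne _ (M + 1) i (by omega) _ _]
      exact ihrest i (by omega) h2

lemma pvBoolA (arr : List Int) (T tgn : Nat) (hT : tgn ≤ T) :
    pvGet2 ((pvDP arr T tgn arr.length).getD arr.length []) (tgn : Int) (tgn : Int) =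
      decide (((tgn : Int), (tgn : Int)) ∈
        (pvLayerSets (tgn : Int) pvInit arr).getD arr.length []) := by
  obtain ⟨_, hmat, _⟩ := pvAFold arr T tgn hT arr.length (le_refl _)
  obtain ⟨_, hm⟩ := hmat arr.length (le_refl _)
  exact hm tgn tgn

lemma pvTables (arr : List Int) (T tgn : Nat) (hT : tgn ≤ T) :
    pvDP arr T tgn arr.length =
      (PySem.List.pyRange 0 ((arr.length : Int) + 1)).map (fun i =>
        (PySem.List.pyRange 0 ((T + 1 : Nat) : Int)).map (fun j =>
          (PySem.List.pyRange 0 ((T + 1 : Nat) : Int)).map (fun k =>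
            (pvDictSeq arr (tgn : Int) arr.length).contains (j, k) &&
              decide ((pvDictSeq arr (tgn : Int) arr.length).getD (j, k) 0 ≤ i)))) := by
  obtain ⟨hlen, hmat, _⟩ := pvAFold arr T tgn hT arr.length (le_refl _)
  rw [show ((arr.length : Int) + 1) = ((arr.length + 1 : Nat) : Int) by push_cast; ring]
  simp only [PySem.List.pyRange_zero_natCast, List.map_map]
  apply List.ext_getElem
  · rw [hlen]
    simp
  · intro i h1 h2
    rw [List.getElem_map, List.getElem_range]
    simp only [Function.comp_apply]
    obtain ⟨⟨hl1, hl2⟩, hm⟩ := hmat i (by omega)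
    rw [show (pvDP arr T tgn arr.length)[i] = (pvDP arr T tgn arr.length).getD i [] from
      (List.getD_eq_getElem _ _ h1).symm]
    apply List.ext_getElem
    · rw [hl1]
      simp
    · intro j hj1 hj2
      rw [List.getElem_map, List.getElem_range]
      simp only [Function.comp_apply]
      have hrowlen : (((pvDP arr T tgn arr.length).getD i [])[j]'(by omega)).length = T + 1 :=
        hl2 _ (List.getElem_mem _)
      apply List.ext_getElem
      · rw [hrowlen]
        simp
      · intro k hk1 hk2
        rw [List.getElem_map, List.getElem_range]
        simp only [Function.comp_apply]
        rw [pvCellB arr (tgn : Int) i (by omega) ((j : Int), (k : Int)), ← hm j k]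
        simp only [pvGet2, Int.toNat_natCast]
        rw [List.getD_eq_getElem _ _ hj1]
        exact (List.getD_eq_getElem _ _ hk1).symm

lemma pvEnumFold (arr : List Int) (target : Int) :
    (PySem.List.enumerate arr 1).foldl (fun d ia => pvBStepD target ia.1 ia.2 d)
      (PySem.Dict.ofList [((((0 : Int), (0 : Int))), (0 : Int))]) =
    pvDictSeq arr target arr.length := by
  unfold pvDictSeq
  rw [List.take_length]
  rfl

lemma pvMain (arr : List Int) (hmod : PySem.Int.mod arr.sum 3 = 0) (hsum : 0 ≤ arr.sum) :
    partition3_dp arr = partition3_dp_alt arr := by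
  have hsumT : arr.sum = ((arr.sum.toNat : Nat) : Int) := (Int.toNat_of_nonneg hsum).symm
  have htgpos : 0 ≤ PySem.Int.floordiv arr.sum 3 := by
    rw [PySem.Int.floordiv_eq_ediv_of_pos (by norm_num)]
    exact Int.ediv_nonneg hsum (by norm_num)
  have htg : PySem.Int.floordiv arr.sum 3 = (((PySem.Int.floordiv arr.sum 3).toNat : Nat) : Int) :=
    (Int.toNat_of_nonneg htgpos).symm
  set T : Nat := arr.sum.toNat with hTdef
  set tgn : Nat := (PySem.Int.floordiv arr.sum 3).toNat with htgdef
  have htot := PySem.Int.floordiv_mul_add_mod arr.sum 3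
  rw [hmod, htg, hsumT] at htot
  have hT : tgn ≤ T := by omega
  simp only [partition3_dp, partition3_dp_alt, hmod, ne_eq, not_true_eq_false, if_false]
  rw [htg, hsumT]
  have hr1 : ((T : Int) + 1) = ((T + 1 : Nat) : Int) := by push_cast; ring
  rw [hr1]
  have hdp0 : (PySem.List.pyRange 0 ((arr.length : Int) + 1)).map (fun _ =>
      (PySem.List.pyRange 0 ((T + 1 : Nat) : Int)).map (fun _ =>
        (PySem.List.pyRange 0 ((T + 1 : Nat) : Int)).map (fun _ => false))) =
      List.replicate (arr.length + 1) (pvFalseLayer (T + 1)) := by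
    rw [show ((arr.length : Int) + 1) = ((arr.length + 1 : Nat) : Int) by push_cast; ring,
      pvMap_pyRange_const]
    congr 1
    rw [pvMap_pyRange_const]
    unfold pvFalseLayer
    congr 1
    rw [pvMap_pyRange_const]
  rw [hdp0]
  have hget0 : (List.replicate (arr.length + 1) (pvFalseLayer (T + 1))).getD 0 [] =
      pvFalseLayer (T + 1) := by
    rw [List.getD_eq_getElem _ _ (by simp)]
    simp
  rw [hget0]
  have hdpF : (PySem.List.pyRange 1 ((arr.length : Int) + 1)).foldl (fun dp i =>
      dp.set i.toNat (pvALayer (dp.getD (i - 1).toNat []) (dp.getD i.toNat [])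
        ((PySem.List.pyGet? arr (i - 1)).getD 0) ((tgn : Nat) : Int)))
      ((List.replicate (arr.length + 1) (pvFalseLayer (T + 1))).set 0
        (pvSet2 (pvFalseLayer (T + 1)) 0 0 true)) = pvDP arr T tgn arr.length := rfl
  rw [hdpF, pvEnumFold arr ((tgn : Nat) : Int)]
  refine Prod.ext ?_ ?_
  · simp only
    rw [pvBoolA arr T tgn hT]
    exact (pvCellB arr ((tgn : Nat) : Int) arr.length le_rfl ((tgn : Int), (tgn : Int))).symm
  · simp only
    rw [pvTables arr T tgn hT]

-- ===== VERDICT (by name: the statement is the Claim_ definition above) =====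
theorem partition3_dp_spec : Claim_equal_partition3_dp := by
  intro arr _ hpre
  unfold Spec_partition3_dp
  by_cases hmod : PySem.Int.mod arr.sum 3 = 0
  · rcases hpre with h | ⟨hsum, _⟩
    · exact absurd hmod h
    · exact pvMain arr hmod hsum
  · simp only [partition3_dp, partition3_dp_alt]
    rw [if_pos hmod, if_pos hmod]
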